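-- pv_equiv track=rewrite | github.com/mayaishere2/August_Internship | model_bank.py | _required_is_covered
-- ===== SOURCE A (Python) =====
-- from typing import Dict, List, Tuple, Set
--
-- SONIC_EQ: Set[str] = {"DT", "DTC", "AC", "SONIC"}
--
-- RES_EQ:   Set[str] = {"RT","RDEP","RMED","RLLD","RLLS","ILD","LLD","LLS","MSFL"}
--
-- def _required_is_covered(required: List[str], available_canon: Set[str]) -> bool:
--     """
--     A model is compatible if every required name is either directly in available_canon
--     or is satisfied by an equivalent family member (sonic / resistivity).
--     """
--     for req in (str(r).upper() for r in required):
--         if req in available_canon: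
--             continue
--         # Family equivalences
--         if req in SONIC_EQ and SONIC_EQ.intersection(available_canon):
--             continue
--         if req in RES_EQ and RES_EQ.intersection(available_canon):
--             continue
--         # Not covered
--         return False
--     return True
-- ===== SOURCE B (Python) =====
-- from typing import List, Set
--
-- SONIC_EQ: Set[str] = {"DT", "DTC", "AC", "SONIC"}
-- RES_EQ:   Set[str] = {"RT","RDEP","RMED","RLLD","RLLS","ILD","LLD","LLS","MSFL"}
--
-- def _required_is_covered(required: List[str], available_canon: Set[str]) -> bool:
--     # Reduce coverage to three set-level conditions instead of a per-name loop:
--     # a family name is covered exactly when its family intersects the available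
--     # set (direct presence already implies that), so only non-family names need
--     # a plain subset check.
--     reqs = {str(r).upper() for r in required}
--     if reqs & SONIC_EQ and not (SONIC_EQ & set(available_canon)):
--         return False
--     if reqs & RES_EQ and not (RES_EQ & set(available_canon)):
--         return False
--     return (reqs - SONIC_EQ - RES_EQ) <= set(available_canon)
-- ===== Notes on version B (the rewrite author's own statement) =====
-- stated objective: alternative
-- what changed: B replaces A's per-required-name loop with branch chains by whole-set algebra: it checks that each needed family (sonic/resistivity) intersects the available set and that the remaining non-family required names form a subset of it, using the fact that a family name present in available already makes the family intersection nonempty.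
import Mathlib
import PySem

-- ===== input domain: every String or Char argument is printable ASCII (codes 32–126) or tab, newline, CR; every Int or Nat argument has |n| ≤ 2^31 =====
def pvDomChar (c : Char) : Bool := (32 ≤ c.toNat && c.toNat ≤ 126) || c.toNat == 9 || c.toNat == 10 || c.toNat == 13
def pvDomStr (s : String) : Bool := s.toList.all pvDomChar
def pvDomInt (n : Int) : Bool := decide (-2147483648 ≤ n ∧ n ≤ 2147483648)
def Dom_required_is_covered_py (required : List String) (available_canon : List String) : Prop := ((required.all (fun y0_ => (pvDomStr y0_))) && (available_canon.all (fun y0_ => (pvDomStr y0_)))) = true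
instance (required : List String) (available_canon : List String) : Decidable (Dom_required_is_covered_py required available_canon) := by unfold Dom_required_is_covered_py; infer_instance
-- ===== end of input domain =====

-- B replaces A's per-name loop with whole-set algebra: each needed family must intersect
-- the available set, and the remaining non-family names must be a subset of it (objective: alternative).

-- SONIC_EQ / RES_EQ module constants (Python set literals)
def pvSonicEq : PySem.Set String := PySem.Set.ofList ["DT", "DTC", "AC", "SONIC"]
def pvResEq : PySem.Set String := PySem.Set.ofList ["RT","RDEP","RMED","RLLD","RLLS","ILD","LLD","LLS","MSFL"]

-- ===== PORT A =====
-- the for-loop with early `return False`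
def pvALoop (avail : List String) : List String → Bool
  | [] => true
  | r :: rest =>
    let req := PySem.Str.upper r
    if avail.contains req then pvALoop avail rest
    else if pvSonicEq.contains req && !(PySem.Set.inter pvSonicEq avail).isEmpty then pvALoop avail rest
    else if pvResEq.contains req && !(PySem.Set.inter pvResEq avail).isEmpty then pvALoop avail rest
    else false

def required_is_covered_py (required : List String) (available_canon : List String) : Bool :=
  pvALoop available_canon required

-- ===== PORT B =====
def required_is_covered_py_alt (required : List String) (available_canon : List String) : Bool :=
  let reqs : PySem.Set String := PySem.Set.ofList (required.map PySem.Str.upper)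
  if !(PySem.Set.inter reqs pvSonicEq).isEmpty && (PySem.Set.inter pvSonicEq available_canon).isEmpty then
    false
  else if !(PySem.Set.inter reqs pvResEq).isEmpty && (PySem.Set.inter pvResEq available_canon).isEmpty then
    false
  else
    PySem.Set.issubset (PySem.Set.diff (PySem.Set.diff reqs pvSonicEq) pvResEq)
      (PySem.Set.ofList available_canon)

-- ===== PRECONDITION & SPEC =====
def Spec_required_is_covered_py (required : List String) (available_canon : List String) (out : Bool) : Prop := out = required_is_covered_py_alt required available_canon
instance (required : List String) (available_canon : List String) (out : Bool) : Decidable (Spec_required_is_covered_py required available_canon out) := by unfold Spec_required_is_covered_py; infer_instance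

-- ===== CLAIM (what is proved, stated in full; the proofs are below) =====
def Claim_equal_required_is_covered_py : Prop := ∀ (required : List String) (available_canon : List String), Dom_required_is_covered_py required available_canon → Spec_required_is_covered_py required available_canon (required_is_covered_py required available_canon)

-- ===== LEMMAS AND PROOFS =====

-- 'x (after uppercasing) is covered' as a proposition
def pvCov (avail : List String) (x : String) : Prop :=
  x ∈ avail ∨ (x ∈ pvSonicEq ∧ ∃ y ∈ pvSonicEq, y ∈ avail) ∨ (x ∈ pvResEq ∧ ∃ y ∈ pvResEq, y ∈ avail)

theorem pv_inter_not_isEmpty (s t : List String) :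
    (PySem.Set.inter s t).isEmpty = false ↔ ∃ y ∈ s, y ∈ t := by
  rw [← Bool.not_eq_true]
  simp [List.isEmpty_iff, List.eq_nil_iff_forall_not_mem, PySem.Set.mem_inter]

theorem pv_loop_iff (avail : List String) : ∀ required : List String,
    pvALoop avail required = true ↔ ∀ r ∈ required, pvCov avail (PySem.Str.upper r) := by
  intro required
  induction required with
  | nil => simp [pvALoop]
  | cons r rest ih =>
    simp only [pvALoop, List.mem_cons, forall_eq_or_imp]
    split_ifs with h1 h2 h3
    · rw [ih]; simp only [List.contains_iff_mem] at h1
      simp [pvCov, h1]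
    · rw [ih]
      rw [Bool.and_eq_true, PySem.Set.contains_iff, Bool.not_eq_true', pv_inter_not_isEmpty] at h2
      simp [pvCov, h2.1, h2.2]
    · rw [ih]
      rw [Bool.and_eq_true, PySem.Set.contains_iff, Bool.not_eq_true', pv_inter_not_isEmpty] at h3
      simp [pvCov, h3.1, h3.2]
    · simp only [false_iff, not_and, not_forall]
      intro hc
      exfalso
      rcases hc with hmem | ⟨hs, hy⟩ | ⟨hr, hy⟩
      · exact h1 (by simpa [List.contains_iff_mem] using hmem)
      · exact h2 (by rw [Bool.and_eq_true, PySem.Set.contains_iff, Bool.not_eq_true', pv_inter_not_isEmpty]; exact ⟨hs, hy⟩)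
      · exact h3 (by rw [Bool.and_eq_true, PySem.Set.contains_iff, Bool.not_eq_true', pv_inter_not_isEmpty]; exact ⟨hr, hy⟩)

-- the two family sets are disjoint (a fact about the constants)
theorem pv_families_disjoint : ∀ x : String, x ∈ pvSonicEq → x ∉ pvResEq := by decide

theorem pv_alt_iff (required avail : List String) :
    required_is_covered_py_alt required avail = true ↔
      ∀ r ∈ required, pvCov avail (PySem.Str.upper r) := by
  unfold required_is_covered_py_alt
  dsimp only
  split_ifs with h1 h2
  · rw [Bool.and_eq_true, Bool.not_eq_true', pv_inter_not_isEmpty] at h1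
    obtain ⟨⟨y, hy, hys⟩, hno⟩ := h1
    rw [List.isEmpty_iff, List.eq_nil_iff_forall_not_mem] at hno
    simp only [PySem.Set.mem_inter, not_and] at hno
    simp only [PySem.Set.mem_ofList, List.mem_map] at hy
    obtain ⟨r, hr, hru⟩ := hy
    simp only [false_iff, not_forall]
    refine ⟨r, hr, ?_⟩
    rw [hru]
    rintro (hav | ⟨_, z, hz, hza⟩ | ⟨hres, _⟩)
    · exact hno y hys hav
    · exact hno z hz hza
    · exact pv_families_disjoint y hys hres
  · rw [Bool.and_eq_true, Bool.not_eq_true', pv_inter_not_isEmpty] at h2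
    obtain ⟨⟨y, hy, hyr⟩, hno⟩ := h2
    rw [List.isEmpty_iff, List.eq_nil_iff_forall_not_mem] at hno
    simp only [PySem.Set.mem_inter, not_and] at hno
    simp only [PySem.Set.mem_ofList, List.mem_map] at hy
    obtain ⟨r, hr, hru⟩ := hy
    simp only [false_iff, not_forall]
    refine ⟨r, hr, ?_⟩
    rw [hru]
    rintro (hav | ⟨hson, _⟩ | ⟨_, z, hz, hza⟩)
    · exact hno y hyr hav
    · exact pv_families_disjoint y hson hyr
    · exact hno z hz hza
  · rw [PySem.Set.issubset_iff]
    simp only [PySem.Set.mem_diff, PySem.Set.mem_ofList, List.mem_map, and_imp,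
      forall_exists_index]
    rw [Bool.not_eq_true, Bool.and_eq_false_iff] at h1 h2
    constructor
    · intro hsub r hr
      have hx : PySem.Str.upper r ∈ PySem.Set.ofList (required.map PySem.Str.upper) := by
        rw [PySem.Set.mem_ofList]; exact List.mem_map.mpr ⟨r, hr, rfl⟩
      by_cases hson : PySem.Str.upper r ∈ pvSonicEq
      · have hne : (PySem.Set.inter (PySem.Set.ofList (required.map PySem.Str.upper)) pvSonicEq).isEmpty = false :=
          (pv_inter_not_isEmpty _ _).mpr ⟨_, hx, hson⟩
        rcases h1 with h1 | h1
        · rw [hne] at h1; simp at h1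
        · exact Or.inr (Or.inl ⟨hson, (pv_inter_not_isEmpty _ _).mp h1⟩)
      · by_cases hres : PySem.Str.upper r ∈ pvResEq
        · have hne : (PySem.Set.inter (PySem.Set.ofList (required.map PySem.Str.upper)) pvResEq).isEmpty = false :=
            (pv_inter_not_isEmpty _ _).mpr ⟨_, hx, hres⟩
          rcases h2 with h2 | h2
          · rw [hne] at h2; simp at h2
          · exact Or.inr (Or.inr ⟨hres, (pv_inter_not_isEmpty _ _).mp h2⟩)
        · exact Or.inl (hsub _ r hr rfl hson hres)
    · intro hcov x r hr hru hson hres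
      rcases hcov r hr with hav | ⟨hs, _⟩ | ⟨hrr, _⟩
      · rw [← hru]; exact hav
      · rw [← hru] at hson; exact absurd hs hson
      · rw [← hru] at hres; exact absurd hrr hres

theorem pv_main (required avail : List String) :
    required_is_covered_py required avail = required_is_covered_py_alt required avail := by
  have := (pv_loop_iff avail required).trans (pv_alt_iff required avail).symm
  unfold required_is_covered_py
  cases h : required_is_covered_py_alt required avail
  · cases h2 : pvALoop avail required
    · rfl
    · rw [h2, h] at this; simp at this
  · rw [this, h]

-- ===== VERDICT (by name: the statement is the Claim_ definition above) =====
theorem required_is_covered_py_spec : Claim_equal_required_is_covered_py := by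
  intro required avail _
  exact pv_main required avail
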